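-- pv_equiv track=rewrite | github.com/Cwengii/pi_scape | pi_scape.py | generate_level
-- ===== SOURCE A (Python) =====
-- import math
--
-- def generate_level(level_number):
--     level = []
--     pi_digits = str(math.pi).replace(".", "")
--     level_width = 20
--     for i in range(level_width * level_number):
--         digit = int(pi_digits[i % len(pi_digits)])
--         level.append(digit)
--     return level
-- ===== SOURCE B (Python) =====
-- import math
--
-- def generate_level(level_number):
--     digits = [int(c) for c in str(math.pi).replace(".", "")]
--     n = 20 * level_number
--     return (digits * (n // len(digits) + 1))[:n]
-- ===== Notes on version B (the rewrite author's own statement) =====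
-- stated objective: faster
-- what changed: B precomputes the digit list once and builds the level by whole-cycle replication plus a slice, replacing A's per-element loop that does modulo string indexing and int() parsing on every iteration.
import Mathlib
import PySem

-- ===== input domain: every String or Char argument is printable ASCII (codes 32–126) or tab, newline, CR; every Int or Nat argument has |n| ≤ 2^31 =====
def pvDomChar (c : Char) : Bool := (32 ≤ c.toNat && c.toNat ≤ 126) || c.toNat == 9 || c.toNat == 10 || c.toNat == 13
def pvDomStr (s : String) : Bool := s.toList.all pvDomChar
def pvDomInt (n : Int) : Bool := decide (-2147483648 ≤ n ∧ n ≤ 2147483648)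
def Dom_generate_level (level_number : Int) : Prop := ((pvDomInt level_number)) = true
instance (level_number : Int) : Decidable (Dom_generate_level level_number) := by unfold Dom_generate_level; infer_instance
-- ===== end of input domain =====

-- B builds the level by whole-cycle replication of the precomputed digit list plus a slice,
-- instead of A's per-element modulo-indexed loop with per-character int() parsing (objective: simpler).


-- ===== PORT A =====
-- strings are modelled on the List Char side (PySem.Chars, exact)
def generate_level (level_number : Int) : List Int :=
  let pi_digits : List Char := PySem.Chars.replace "3.141592653589793".toList ".".toList "".toList
  (PySem.List.pyRange 0 (20 * level_number) 1).foldl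
    (fun level i =>
      -- digit = int(pi_digits[i % len(pi_digits)]): i ≥ 0 and the divisor is positive, so the index
      -- is always in range, and every character is a decimal digit — both getD defaults are unreachable
      let digit : Int :=
        (PySem.Int.ofChars? [(PySem.List.pyGet? pi_digits (PySem.Int.mod i (PySem.Chars.len pi_digits))).getD ' ']).getD 0
      level ++ [digit]) []

-- ===== PORT B =====
def generate_level_alt (level_number : Int) : List Int :=
  let digits : List Int :=
    (PySem.Chars.replace "3.141592653589793".toList ".".toList "".toList).map
      (fun c => (PySem.Int.ofChars? [c]).getD 0)   -- int(c): every character is a digit, getD unreachable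
  let n : Int := 20 * level_number
  let k : Int := PySem.Int.floordiv n (digits.length : Int) + 1
  -- Python 'digits * k': k concatenated copies, [] when k ≤ 0 (ported by hand, exact)
  let rep : List Int := if k ≤ 0 then [] else (List.replicate k.toNat digits).flatten
  PySem.List.slice rep none (some n)

-- ===== PRECONDITION & SPEC =====
def Spec_generate_level (level_number : Int) (out : List Int) : Prop := out = generate_level_alt level_number
instance (level_number : Int) (out : List Int) : Decidable (Spec_generate_level level_number out) := by unfold Spec_generate_level; infer_instance

-- ===== CLAIM (what is proved, stated in full; the proofs are below) =====
def Claim_equal_generate_level : Prop := ∀ (level_number : Int), Dom_generate_level level_number → Spec_generate_level level_number (generate_level level_number)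

-- ===== LEMMAS AND PROOFS =====

-- the pi digits as a literal list of Ints (proof-only abbreviation)
def pvD : List Int := [3, 1, 4, 1, 5, 9, 2, 6, 5, 3, 5, 8, 9, 7, 9, 3]

theorem pvD_digits :
    (PySem.Chars.replace "3.141592653589793".toList ".".toList "".toList).map
      (fun c => (PySem.Int.ofChars? [c]).getD 0) = pvD := by decide

theorem pv_pyRange_zero (n : Nat) :
    PySem.List.pyRange 0 (n : Int) 1 = (List.range n).map Int.ofNat := by
  rw [PySem.List.pyRange_zero_natCast]; simp

theorem pv_take_cycle (X : List Int) (k : Nat) : (pvD ++ X).take (16 + k) = pvD ++ X.take k := by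
  have h : (16 : Nat) + k = pvD.length + k := by simp [pvD]
  rw [h, List.take_append]; simp

-- A's modulo-indexed traversal equals B's replicate-and-truncate form, on the digit literal
theorem pv_core (m : Nat) :
    (List.range m).map (fun j => pvD.getD (j % 16) 0)
      = ((List.replicate (m / 16 + 1) pvD).flatten).take m := by
  by_cases h : m < 16
  · interval_cases m <;> decide
  · have ih := pv_core (m - 16)
    have hm16 : m = 16 + (m - 16) := by omega
    rw [hm16, List.range_add, List.map_append, List.map_map]
    have h1 : (List.range 16).map (fun j => pvD.getD (j % 16) 0) = pvD := by decide
    have h2 : ((fun j => pvD.getD (j % 16) 0) ∘ (fun x => 16 + x))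
        = (fun j => pvD.getD (j % 16) 0) := by
      funext j; simp
    have h3 : (16 + (m - 16)) / 16 + 1 = (m - 16) / 16 + 1 + 1 := by omega
    have hsplit : (List.replicate ((m - 16) / 16 + 1 + 1) pvD).flatten
        = pvD ++ (List.replicate ((m - 16) / 16 + 1) pvD).flatten := by
      rw [List.replicate_succ, List.flatten_cons]
    rw [h1, h2, h3, hsplit, pv_take_cycle]
    exact congrArg _ ih
  termination_by m

-- A's per-iteration digit, at a nonnegative index, is a modulo lookup in the digit literal
theorem pv_digitA (j : Nat) :
    ((PySem.Int.ofChars?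
        [(PySem.List.pyGet? ("3141592653589793".toList)
            (PySem.Int.mod (j : Int) (PySem.Chars.len ("3141592653589793".toList)))).getD ' ']).getD 0)
      = pvD.getD (j % 16) 0 := by
  have hlen : PySem.Chars.len ("3141592653589793".toList) = ((16 : Nat) : Int) := by decide
  have hmod : PySem.Int.mod (j : Int) (((16 : Nat)) : Int) = ((j % 16 : Nat) : Int) :=
    PySem.Int.mod_natCast j 16
  rw [hlen, hmod]
  have hr : j % 16 < 16 := Nat.mod_lt _ (by norm_num)
  set r := j % 16 with hrdef
  clear_value r
  interval_cases r <;> decide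

theorem pv_replace_lit : PySem.Chars.replace "3.141592653589793".toList ".".toList "".toList
    = "3141592653589793".toList := by decide

theorem generate_level_eq (L : Int) : generate_level L = generate_level_alt L := by
  by_cases hn : 20 * L < 0
  · -- negative n: A's range is empty; B's multiplier k is ≤ 0, so both sides are []
    have hA : generate_level L = [] := by
      unfold generate_level
      rw [PySem.List.pyRange_one_eq_nil (by omega)]
      rfl
    have hk : PySem.Int.floordiv (20 * L) ((pvD.length : Nat) : Int) + 1 ≤ 0 := by
      have h16 : ((pvD.length : Nat) : Int) = (16 : Int) := by decide
      rw [h16]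
      have := (PySem.Int.floordiv_lt_iff_lt_mul
        (a := 20 * L) (b := 16) (q := 0) (by norm_num)).mpr (by omega)
      omega
    have hB : generate_level_alt L = [] := by
      simp only [generate_level_alt, pvD_digits]
      rw [if_pos hk]
      simp [PySem.List.slice]
    rw [hA, hB]
  · -- nonnegative n = 20 * L = up-cast of m
    have hm : 20 * L = ((20 * L).toNat : Int) := by omega
    set m : Nat := (20 * L).toNat with hmdef
    have hA : generate_level L = (List.range m).map (fun j => pvD.getD (j % 16) 0) := by
      unfold generate_level
      simp only [pv_replace_lit]
      rw [hm, pv_pyRange_zero, PySem.List.foldl_append_singleton_eq_map, List.map_map,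
        List.nil_append]
      exact List.map_congr_left (fun j _ => pv_digitA j)
    have hB : generate_level_alt L
        = ((List.replicate (m / 16 + 1) pvD).flatten).take m := by
      simp only [generate_level_alt, pvD_digits]
      rw [hm]
      have h16 : ((pvD.length : Nat) : Int) = (((16 : Nat)) : Int) := by decide
      rw [h16, PySem.Int.floordiv_natCast]
      have hkpos : ¬ ((((m / 16 : Nat)) : Int) + 1 ≤ 0) := by
        have : (0 : Int) ≤ ((m / 16 : Nat) : Int) := Int.natCast_nonneg _
        omega
      rw [if_neg hkpos]
      have htoNat : (((((m / 16 : Nat)) : Int)) + 1).toNat = m / 16 + 1 := by omega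
      rw [htoNat, PySem.List.slice_to_natCast]
    rw [hA, hB]
    exact pv_core m

-- ===== VERDICT (by name: the statement is the Claim_ definition above) =====
theorem generate_level_spec : Claim_equal_generate_level := by
  intro L _
  unfold Spec_generate_level
  exact generate_level_eq L
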